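-- pv_equiv track=rewrite | github.com/bssrdf/pyleet | NumberofUniqueFlavorsAfterSharingKCandies.py | maxUniqueCandies1
-- ===== SOURCE A (Python) =====
-- from typing import List
-- from collections import Counter, defaultdict
--
-- def maxUniqueCandies1(candies: List[int], k: int) -> int:
--     # wrong answer
--     count = Counter(candies)
--     n = len(count)
--     if k == 0: return n
--     mi, mig, given = n, None, defaultdict(int)
--     for i,c in enumerate(candies):
--         given[c] += 1
--         if i+1 > k:
--             given[candies[i-k]] -= 1
--             if given[candies[i-k]] == 0:
--                 given.pop(candies[i-k])
--         if mi > len(given):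
--             mi = len(given)
--             mig = dict(given)
--     ans = n
--     for c in mig:
--         if mig[c] == count[c]:
--             ans -= 1
--     return ans
-- ===== SOURCE B (Python) =====
-- def maxUniqueCandies1(candies, k):
--     # Brute-force rewrite: number of distinct flavors overall, minus the flavors
--     # that are entirely contained in the chosen window (the earliest window of
--     # minimal distinct count), recomputed per index from slices instead of an
--     # incrementally maintained counter dict with snapshots.
--     n = len(set(candies))
--     if k == 0:
--         return n
--     best_i, best_d = 0, None
--     for i in range(len(candies)):
--         d = len(set(candies[max(0, i - k + 1):i + 1]))
--         if best_d is None or d < best_d: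
--             best_i, best_d = i, d
--     window = candies[max(0, best_i - k + 1):best_i + 1]
--     return n - sum(1 for c in set(window) if window.count(c) == candies.count(c))
-- ===== Notes on version B (the rewrite author's own statement) =====
-- stated objective: alternative
-- what changed: Replaces A's incrementally maintained sliding counter dict (with a dict snapshot copied at every new minimum) by a brute-force per-index recomputation of each window's distinct count from slices, keeping only the best window's end index and counting the fully-given-away flavors once at the end.
import Mathlib
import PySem

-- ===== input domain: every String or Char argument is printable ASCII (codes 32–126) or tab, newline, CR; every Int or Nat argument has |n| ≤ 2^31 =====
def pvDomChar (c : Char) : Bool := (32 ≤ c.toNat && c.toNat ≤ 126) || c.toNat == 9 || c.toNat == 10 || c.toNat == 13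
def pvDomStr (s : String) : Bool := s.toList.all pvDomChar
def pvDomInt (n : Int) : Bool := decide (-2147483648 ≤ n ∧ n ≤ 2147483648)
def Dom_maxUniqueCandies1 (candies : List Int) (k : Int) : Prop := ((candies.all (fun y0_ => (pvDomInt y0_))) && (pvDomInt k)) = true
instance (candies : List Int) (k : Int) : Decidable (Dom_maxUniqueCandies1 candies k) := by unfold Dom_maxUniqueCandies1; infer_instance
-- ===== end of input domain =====

-- B replaces A's incrementally maintained sliding counter dict (with snapshot copies at
-- every new minimum) by a brute-force per-index recomputation of each window's distinct
-- count from slices, keeping only the best index; objective: alternative (not faster).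

-- ===== PORT A =====
-- lines 3-5 of A's loop body: decrement the leaving flavor candies[i-k], popping it at zero
def shrinkStep (candies : List Int) (k : Int) (given : PySem.Dict Int Int) (i : Int) :
    PySem.Dict Int Int :=
  let d := PySem.List.pyGetD candies (i - k) 0   -- candies[i-k]; in range whenever Pre_ holds
  let g2 := given.modify d 0 (· - 1)             -- given[candies[i-k]] -= 1 (defaultdict)
  if g2.getD d 0 = 0 then
    match g2.pop? d with                         -- given.pop(candies[i-k])
    | some (_, g) => g
    | none => g2
  else g2

-- the body of A's `for i,c in enumerate(candies)` loop
def aStep (candies : List Int) (k : Int)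
    (s : Int × Option (PySem.Dict Int Int) × PySem.Dict Int Int) (ic : Int × Int) :
    Int × Option (PySem.Dict Int Int) × PySem.Dict Int Int :=
  let given := s.2.2.modify ic.2 0 (· + 1)       -- given[c] += 1 (defaultdict)
  let given := if ic.1 + 1 > k then shrinkStep candies k given ic.1 else given
  if s.1 > (given.size : Int) then ((given.size : Int), some given, given)
  else (s.1, s.2.1, given)

def maxUniqueCandies1 (candies : List Int) (k : Int) : Int :=
  let count := PySem.Dict.counter candies
  let n : Int := count.size
  if k = 0 then n
  else
    let st := (PySem.List.enumerate candies).foldl (aStep candies k) (n, none, PySem.Dict.empty)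
    match st.2.1 with
    | none => 0  -- Python raises TypeError here (mig is still None); Pre_ excludes these inputs
    | some mig =>
      mig.keys.foldl (fun ans c => if mig.getD c 0 = count.getD c 0 then ans - 1 else ans) n

-- ===== PORT B =====
-- candies[max(0, i - k + 1):i + 1]
def slideWin (candies : List Int) (k i : Int) : List Int :=
  PySem.List.slice candies (some (max 0 (i - k + 1))) (some (i + 1))

-- the body of B's `for i in range(len(candies))` loop
def bStep (candies : List Int) (k : Int) (s : Int × Option Int) (i : Int) : Int × Option Int :=
  let d : Int := (PySem.Set.ofList (slideWin candies k i)).length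
  match s.2 with
  | none => (i, some d)
  | some bd => if d < bd then (i, some d) else s

def maxUniqueCandies1_alt (candies : List Int) (k : Int) : Int :=
  let n : Int := (PySem.Set.ofList candies).length
  if k = 0 then n
  else
    let best := (PySem.List.pyRange 0 (PySem.List.len candies)).foldl (bStep candies k) (0, none)
    let window := slideWin candies k best.1
    n - ((PySem.Set.ofList window).countP
          (fun c => PySem.List.count window c == PySem.List.count candies c) : Int)

-- ===== PRECONDITION & SPEC =====
-- Pre_ excludes exactly the inputs on which A raises: k < 0 (IndexError on candies[i-k],
-- or TypeError when candies is empty), and k > 0 with at most one distinct flavor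
-- (mig stays None, so `for c in mig` raises TypeError).
def Pre_maxUniqueCandies1 (candies : List Int) (k : Int) : Prop :=
  0 ≤ k ∧ (k = 0 ∨ ∃ x ∈ candies, ∃ y ∈ candies, x ≠ y)
instance (candies : List Int) (k : Int) : Decidable (Pre_maxUniqueCandies1 candies k) := by
  unfold Pre_maxUniqueCandies1; infer_instance

def pvWitness_maxUniqueCandies1 : List Int × Int := ([1, 2, 1], 1)

def Spec_maxUniqueCandies1 (candies : List Int) (k : Int) (out : Int) : Prop := out = maxUniqueCandies1_alt candies k
instance (candies : List Int) (k : Int) (out : Int) : Decidable (Spec_maxUniqueCandies1 candies k out) := by unfold Spec_maxUniqueCandies1; infer_instance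

-- ===== CLAIM (what is proved, stated in full; the proofs are below) =====
def Claim_equal_maxUniqueCandies1 : Prop := ∀ (candies : List Int) (k : Int), Dom_maxUniqueCandies1 candies k → Pre_maxUniqueCandies1 candies k → Spec_maxUniqueCandies1 candies k (maxUniqueCandies1 candies k)
-- ===== LEMMAS AND PROOFS =====

-- the window candies[max(0, i-k+1) : i+1] in Nat form
def winN (candies : List Int) (kn i : Nat) : List Int := (candies.take (i+1)).drop (i+1-kn)

-- its distinct count
def Dn (candies : List Int) (kn i : Nat) : Nat := (PySem.Set.ofList (winN candies kn i)).length

-- `g` is a counter of the multiset `w` (keys in some order)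
def CRep (g : PySem.Dict Int Int) (w : List Int) : Prop :=
  g.keys.Nodup ∧ (∀ c, g.getD c 0 = (w.count c : Int)) ∧ (∀ c, g.contains c = true ↔ c ∈ w)

-- the earliest-strict-minimum tracker both loops compute: (best index, its distinct count)
def trk (candies : List Int) (kn m : Nat) : Option (Nat × Nat) :=
  (List.range m).foldl
    (fun s j => match s with
      | none => some (j, Dn candies kn j)
      | some p => if Dn candies kn j < p.2 then some (j, Dn candies kn j) else s)
    none

lemma counter_size (xs : List Int) :
    (PySem.Dict.counter xs).size = (PySem.Set.ofList xs).length := by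
  have h := congrArg List.length (PySem.Dict.keys_counter xs)
  simpa [PySem.Dict.keys, PySem.Dict.size] using h

lemma find?_filter_key (l : List (Int × Int)) (x d : Int) (h : x ≠ d) :
    (l.filter (fun p => !(p.1 == d))).find? (fun p => p.1 == x) = l.find? (fun p => p.1 == x) := by
  induction l with
  | nil => rfl
  | cons p l ih =>
    by_cases hd : p.1 = d
    · have hx : (p.1 == x) = false := by
        simp only [beq_eq_false_iff_ne]; exact fun e => h (e ▸ hd)
      simp [hd, ih, Ne.symm h]
    · by_cases hx : p.1 = x
      · simp [hx, h]
      · simp [hd, hx, ih]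

lemma get?_erase_self (g : PySem.Dict Int Int) (d : Int) : (g.erase d).get? d = none := by
  have h : (g.items.filter (fun p => !(p.1 == d))).find? (fun p => p.1 == d) = none := by
    rw [List.find?_eq_none]
    intro p hp
    have := (List.mem_filter.mp hp).2
    simpa using this
  simp [PySem.Dict.get?, PySem.Dict.erase, h]

lemma get?_erase_ne (g : PySem.Dict Int Int) (x d : Int) (h : x ≠ d) :
    (g.erase d).get? x = g.get? x := by
  simp [PySem.Dict.get?, PySem.Dict.erase, find?_filter_key g.items x d h]

lemma nodup_keys_erase (g : PySem.Dict Int Int) (d : Int) (h : g.keys.Nodup) :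
    (g.erase d).keys.Nodup := by
  have hsub : (g.erase d).keys.Sublist g.keys := by
    simpa [PySem.Dict.keys, PySem.Dict.erase] using (List.filter_sublist (l := g.items)).map Prod.fst
  exact h.sublist hsub

lemma CRep_empty : CRep PySem.Dict.empty [] := by
  refine ⟨by simp [PySem.Dict.keys, PySem.Dict.empty], fun c => by simp, fun c => by simp⟩

lemma CRep_add (g : PySem.Dict Int Int) (w : List Int) (c : Int) (h : CRep g w) :
    CRep (g.modify c 0 (· + 1)) (w ++ [c]) := by
  obtain ⟨hnd, hgetD, hmem⟩ := h
  refine ⟨?_, ?_, ?_⟩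
  · rw [PySem.Dict.keys_modify]
    exact PySem.Dict.nodup_keys_insert _ _ _ hnd
  · intro x
    rw [PySem.Dict.getD_modify]
    by_cases hx : x = c
    · subst hx; simp [hgetD, List.count_append]
    · simp [hgetD, List.count_append, hx, Ne.symm hx]
  · intro x
    rw [PySem.Dict.contains_modify]
    by_cases hx : x = c
    · subst hx; simp
    · simp [hx, hmem]

lemma CRep_shrink (g : PySem.Dict Int Int) (d : Int) (t : List Int) (h : CRep g (d :: t)) :
    CRep (let g2 := g.modify d 0 (· - 1);
         if g2.getD d 0 = 0 then
           (match g2.pop? d with | some (_, g') => g' | none => g2)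
         else g2) t := by
  obtain ⟨hnd, hgetD, hmem⟩ := h
  have hnd2 : (g.modify d 0 (· - 1)).keys.Nodup := by
    rw [PySem.Dict.keys_modify]; exact PySem.Dict.nodup_keys_insert _ _ _ hnd
  have hget2 : ∀ x, (g.modify d 0 (· - 1)).getD x 0 = (t.count x : Int) := by
    intro x
    rw [PySem.Dict.getD_modify]
    by_cases hx : x = d
    · subst hx; rw [hgetD]; simp [List.count_cons_self]
    · rw [if_neg hx, hgetD]; simp [Ne.symm hx]
  have hcon2 : ∀ x, (g.modify d 0 (· - 1)).contains x = true ↔ x = d ∨ x ∈ t := by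
    intro x
    rw [PySem.Dict.contains_modify]
    by_cases hx : x = d
    · simp [hx]
    · simp [hx, hmem]
  dsimp only
  by_cases h0 : (g.modify d 0 (· - 1)).getD d 0 = 0
  · rw [if_pos h0]
    have hdt : d ∉ t := by
      have := hget2 d
      rw [h0] at this
      have : t.count d = 0 := by exact_mod_cast this.symm
      exact List.count_eq_zero.mp this
    have hcon : (g.modify d 0 (· - 1)).contains d = true := (hcon2 d).mpr (Or.inl rfl)
    rw [PySem.Dict.contains_eq_isSome_get?] at hcon
    obtain ⟨v, hv⟩ := Option.isSome_iff_exists.mp hcon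
    simp only [PySem.Dict.pop?, hv, Option.map]
    refine ⟨nodup_keys_erase _ _ hnd2, ?_, ?_⟩
    · intro x
      by_cases hx : x = d
      · subst hx
        rw [PySem.Dict.getD, get?_erase_self]
        simp [List.count_eq_zero.mpr hdt]
      · rw [PySem.Dict.getD, get?_erase_ne _ _ _ hx, ← PySem.Dict.getD]
        exact hget2 x
    · intro x
      rw [PySem.Dict.contains_eq_isSome_get?]
      by_cases hx : x = d
      · subst hx
        rw [get?_erase_self]
        simp [hdt]
      · rw [get?_erase_ne _ _ _ hx, ← PySem.Dict.contains_eq_isSome_get?]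
        rw [hcon2 x]
        simp [hx]
  · rw [if_neg h0]
    refine ⟨hnd2, hget2, ?_⟩
    intro x
    rw [hcon2 x]
    by_cases hx : x = d
    · subst hx
      have : t.count x ≠ 0 := by
        intro hc
        apply h0
        rw [hget2 x, hc]; rfl
      simp [List.count_pos_iff.mp (Nat.pos_of_ne_zero this)]
    · simp [hx]

lemma shrinkStep_CRep (candies : List Int) (k i : Int) (g : PySem.Dict Int Int) (t : List Int)
    (h : CRep g (PySem.List.pyGetD candies (i - k) 0 :: t)) :
    CRep (shrinkStep candies k g i) t := by
  have := CRep_shrink g (PySem.List.pyGetD candies (i - k) 0) t h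
  simpa [shrinkStep] using this

lemma keys_perm_ofList (g : PySem.Dict Int Int) (w : List Int) (h : CRep g w) :
    g.keys.Perm (PySem.Set.ofList w) := by
  obtain ⟨hnd, _, hmem⟩ := h
  rw [List.perm_ext_iff_of_nodup hnd (PySem.Set.nodup_ofList w)]
  intro a
  rw [PySem.Set.mem_ofList, ← hmem a, PySem.Dict.contains_iff_mem_keys]

lemma CRep_size (g : PySem.Dict Int Int) (w : List Int) (h : CRep g w) :
    g.size = (PySem.Set.ofList w).length := by
  have hlen : g.keys.length = g.size := by simp [PySem.Dict.keys, PySem.Dict.size]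
  rw [← hlen, (keys_perm_ofList g w h).length_eq]

lemma CRep_countP (g : PySem.Dict Int Int) (w : List Int) (h : CRep g w) (p : Int → Bool) :
    g.keys.countP p = (PySem.Set.ofList w).countP p := by
  exact (keys_perm_ofList g w h).countP_eq p

lemma win_zero (candies : List Int) (kn : Nat) (hk : 1 ≤ kn) (h : 0 < candies.length) :
    winN candies kn 0 = [candies[0]] := by
  unfold winN
  obtain ⟨c, t, rfl⟩ : ∃ c t, candies = c :: t := by
    cases candies with
    | nil => simp at h
    | cons c t => exact ⟨c, t, rfl⟩
  have h1 : 1 - kn = 0 := by omega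
  simp [h1]

lemma win_step_small (candies : List Int) (kn m : Nat) (hm1 : 1 ≤ m)
    (h : m < candies.length) (hk : m < kn) :
    winN candies kn m = winN candies kn (m-1) ++ [candies[m]] := by
  unfold winN
  have hm' : m - 1 + 1 = m := by omega
  rw [hm']
  have h2 : m+1-kn = 0 := by omega
  have h1 : m-kn = 0 := by omega
  rw [h2, h1]
  simp only [List.drop_zero]
  rw [List.take_add_one, List.getElem?_eq_getElem h]
  simp

lemma win_slide_decomp (candies : List Int) (kn m : Nat) (hk1 : 1 ≤ kn) (hm1 : 1 ≤ m)
    (hkle : kn ≤ m) (h : m < candies.length) :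
    winN candies kn (m-1) = candies[m-kn] :: ((candies.take m).drop (m+1-kn))
    ∧ winN candies kn m = ((candies.take m).drop (m+1-kn)) ++ [candies[m]] := by
  have hm' : m - 1 + 1 = m := by omega
  constructor
  · unfold winN
    rw [hm']
    have hlt : m-kn < (candies.take m).length := by
      rw [List.length_take]; omega
    rw [List.drop_eq_getElem_cons hlt]
    have e1 : (candies.take m)[m-kn] = candies[m-kn]'(by omega) := by
      rw [List.getElem_take]
    have e2 : m-kn+1 = m+1-kn := by omega
    rw [e1, e2]
  · unfold winN
    rw [List.take_add_one, List.getElem?_eq_getElem h]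
    rw [List.drop_append_of_le_length (by rw [List.length_take]; omega)]
    simp

lemma slideWin_eq_winN (candies : List Int) (k : Int) (kn : Nat) (hk : k = (kn : Int))
    (j : Nat) :
    slideWin candies k (j : Int) = winN candies kn j := by
  unfold slideWin winN
  have hmax : max 0 ((j : Int) - k + 1) = ((j+1-kn : Nat) : Int) := by
    subst hk; omega
  have hone : (j : Int) + 1 = ((j+1 : Nat) : Int) := by push_cast; ring
  rw [hmax, hone, PySem.List.slice_natCast, List.drop_take]

lemma trk_succ (candies : List Int) (kn m : Nat) :
    trk candies kn (m+1) =
      match trk candies kn m with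
      | none => some (m, Dn candies kn m)
      | some p => if Dn candies kn m < p.2 then some (m, Dn candies kn m) else some p := by
  rw [trk, List.range_succ, List.foldl_append]
  rcases h : trk candies kn m with _ | p <;> simp [trk] at h <;> simp [h]

def idxList (m : Nat) : List Int := (List.range m).map (Nat.cast : Nat → Int)

lemma idxList_succ (m : Nat) : idxList (m+1) = idxList m ++ [(m : Int)] := by
  rw [idxList, idxList, List.range_succ, List.map_append]; rfl

lemma A_inv (candies : List Int) (k : Int) (kn : Nat) (hk : k = (kn : Int)) (hk1 : 1 ≤ kn)
    (hn : 2 ≤ (PySem.Set.ofList candies).length) :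
    ∀ m, 1 ≤ m → m ≤ candies.length →
    ∃ (g migd : PySem.Dict Int Int) (bj bd : Nat),
      ((idxList m).map (fun i => (i, PySem.List.pyGetD candies i 0))).foldl
          (aStep candies k) (((PySem.Dict.counter candies).size : Int), none, PySem.Dict.empty)
        = ((bd : Int), some migd, g)
      ∧ CRep g (winN candies kn (m-1)) ∧ CRep migd (winN candies kn bj)
      ∧ trk candies kn m = some (bj, bd) := by
  intro m hm1
  induction m, hm1 using Nat.le_induction with
  | base =>
    intro hmlen
    have h0 : 0 < candies.length := by omega
    have hc0 : PySem.List.pyGetD candies (0 : Int) 0 = candies[0] := by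
      rw [show (0 : Int) = ((0 : Nat) : Int) from rfl, PySem.List.pyGetD_natCast]
      exact List.getD_eq_getElem candies 0 h0
    set g1 : PySem.Dict Int Int := PySem.Dict.empty.modify (candies[0]) 0 (· + 1) with hg1
    have hrep1 : CRep g1 (winN candies kn 0) := by
      rw [win_zero candies kn hk1 h0, hg1]
      simpa using CRep_add PySem.Dict.empty [] candies[0] CRep_empty
    have hone : (PySem.Set.ofList [candies[0]]).length = 1 := by
      simp [PySem.Set.ofList, PySem.Set.add, PySem.Set.empty]
    have hsz : g1.size = 1 := by
      rw [CRep_size _ _ hrep1, win_zero candies kn hk1 h0, hone]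
    have hDn : Dn candies kn 0 = 1 := by
      rw [Dn, win_zero candies kn hk1 h0, hone]
    refine ⟨g1, g1, 0, Dn candies kn 0, ?_, ?_, hrep1, ?_⟩
    · show List.foldl _ _ ((idxList 1).map _) = _
      rw [show (idxList 1) = [(0 : Int)] by simp [idxList]]
      simp only [List.map_cons, List.map_nil, List.foldl_cons, List.foldl_nil]
      rw [aStep]
      simp only [hc0]
      rw [← hg1]
      rw [if_neg (by rw [hk]; push_cast; omega : ¬ (0 : Int) + 1 > k)]
      rw [if_pos (by rw [counter_size, hsz]; push_cast; omega)]
      rw [hsz, hDn]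
    · rwa [Nat.sub_self]
    · simp [trk, hDn]
  | succ m hm ih =>
    intro hmlen
    obtain ⟨g, migd, bj, bd, hfold, hrepg, hrepm, htrk⟩ := ih (by omega)
    have hmlt : m < candies.length := by omega
    have hc : PySem.List.pyGetD candies ((m : Nat) : Int) 0 = candies[m] := by
      rw [PySem.List.pyGetD_natCast]
      exact List.getD_eq_getElem candies 0 hmlt
    rw [idxList_succ, List.map_append, List.foldl_append, hfold]
    simp only [List.map_cons, List.map_nil, List.foldl_cons, List.foldl_nil]
    rw [aStep]
    simp only [hc]
    have hrep1 : CRep (g.modify (candies[m]) 0 (· + 1)) (winN candies kn (m-1) ++ [candies[m]]) :=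
      CRep_add g _ _ hrepg
    by_cases hkn2 : kn ≤ m
    · -- sliding branch: the window loses its first element candies[m-kn]
      rw [if_pos (by rw [hk]; omega : ((m : Nat) : Int) + 1 > k)]
      have hcast : ((m : Nat) : Int) - k = ((m - kn : Nat) : Int) := by rw [hk]; omega
      have hd : PySem.List.pyGetD candies (((m : Nat) : Int) - k) 0 = candies[m-kn] := by
        rw [hcast, PySem.List.pyGetD_natCast]
        exact List.getD_eq_getElem candies 0 (show m - kn < candies.length by omega)
      obtain ⟨hw1, hw2⟩ := win_slide_decomp candies kn m hk1 (by omega) hkn2 hmlt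
      have hrep3 : CRep (shrinkStep candies k (g.modify (candies[m]) 0 (· + 1)) ((m : Nat) : Int))
          (winN candies kn m) := by
        apply shrinkStep_CRep
        rw [hd, hw2]
        rw [hw1, List.cons_append] at hrep1
        exact hrep1
      have hsz3 : ((shrinkStep candies k (g.modify (candies[m]) 0 (· + 1)) ((m : Nat) : Int)).size : Int)
          = ((Dn candies kn m : Nat) : Int) := by
        rw [CRep_size _ _ hrep3]; rfl
      by_cases hlt : Dn candies kn m < bd
      · refine ⟨shrinkStep candies k (g.modify (candies[m]) 0 (· + 1)) ((m : Nat) : Int),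
                shrinkStep candies k (g.modify (candies[m]) 0 (· + 1)) ((m : Nat) : Int),
                m, Dn candies kn m, ?_, ?_, ?_, ?_⟩
        · rw [if_pos (by rw [hsz3]; exact_mod_cast hlt)]
          rw [hsz3]
        · simpa using hrep3
        · exact hrep3
        · rw [trk_succ, htrk]; simp [hlt]
      · refine ⟨shrinkStep candies k (g.modify (candies[m]) 0 (· + 1)) ((m : Nat) : Int),
                migd, bj, bd, ?_, ?_, hrepm, ?_⟩
        · rw [if_neg (by rw [hsz3]; simp; exact_mod_cast not_lt.mp hlt)]
        · simpa using hrep3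
        · rw [trk_succ, htrk]; simp [hlt]
    · -- growing branch: the window only gains candies[m]
      rw [if_neg (by rw [hk]; omega : ¬ ((m : Nat) : Int) + 1 > k)]
      have hrep3 : CRep (g.modify (candies[m]) 0 (· + 1)) (winN candies kn m) := by
        rw [win_step_small candies kn m (by omega) hmlt (by omega)]
        exact hrep1
      have hsz3 : ((g.modify (candies[m]) 0 (· + 1)).size : Int) = ((Dn candies kn m : Nat) : Int) := by
        rw [CRep_size _ _ hrep3]; rfl
      by_cases hlt : Dn candies kn m < bd
      · refine ⟨g.modify (candies[m]) 0 (· + 1), g.modify (candies[m]) 0 (· + 1),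
                m, Dn candies kn m, ?_, ?_, ?_, ?_⟩
        · rw [if_pos (by rw [hsz3]; exact_mod_cast hlt)]
          rw [hsz3]
        · simpa using hrep3
        · exact hrep3
        · rw [trk_succ, htrk]; simp [hlt]
      · refine ⟨g.modify (candies[m]) 0 (· + 1), migd, bj, bd, ?_, ?_, hrepm, ?_⟩
        · rw [if_neg (by rw [hsz3]; simp; exact_mod_cast not_lt.mp hlt)]
        · simpa using hrep3
        · rw [trk_succ, htrk]; simp [hlt]

lemma B_inv (candies : List Int) (k : Int) (kn : Nat) (hk : k = (kn : Int)) :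
    ∀ m,
    (idxList m).foldl (bStep candies k) (0, none)
      = (match trk candies kn m with
         | none => ((0 : Int), none)
         | some p => ((p.1 : Int), some (p.2 : Int))) := by
  intro m
  induction m with
  | zero => simp [trk, idxList]
  | succ m ih =>
    rw [idxList_succ, List.foldl_append, ih, trk_succ]
    have hd : ((PySem.Set.ofList (slideWin candies k ((m : Nat) : Int))).length : Int)
        = ((Dn candies kn m : Nat) : Int) := by
      rw [slideWin_eq_winN candies k kn hk m]; rfl
    rcases htm : trk candies kn m with _ | p
    · simp [bStep, hd]
    · simp only [List.foldl_cons, List.foldl_nil, bStep, hd]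
      by_cases hlt : Dn candies kn m < p.2
      · simp [hlt, Nat.cast_lt]
      · simp [hlt, Nat.cast_lt]

lemma foldl_if_sub (migd count : PySem.Dict Int Int) (l : List Int) (a : Int) :
    l.foldl (fun ans c => if migd.getD c 0 = count.getD c 0 then ans - 1 else ans) a
      = a - (l.countP (fun c => migd.getD c 0 == count.getD c 0) : Int) := by
  induction l generalizing a with
  | nil => simp
  | cons x l ih =>
    by_cases hx : migd.getD x 0 = count.getD x 0
    · simp [List.foldl_cons, hx, ih]; ring
    · simp [List.foldl_cons, hx, ih]

lemma two_le_card (candies : List Int) (x y : Int) (hx : x ∈ candies) (hy : y ∈ candies)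
    (hxy : x ≠ y) : 2 ≤ (PySem.Set.ofList candies).length := by
  have hx' : x ∈ PySem.Set.ofList candies := (PySem.Set.mem_ofList candies x).mpr hx
  have hy' : y ∈ PySem.Set.ofList candies := (PySem.Set.mem_ofList candies y).mpr hy
  by_contra hlt
  push Not at hlt
  interval_cases h : (PySem.Set.ofList candies).length
  · rw [List.length_eq_zero_iff] at h; rw [h] at hx'; simp at hx'
  · rw [List.length_eq_one_iff] at h
    obtain ⟨a, ha⟩ := h
    rw [ha] at hx' hy'
    simp at hx' hy'
    exact hxy (hx'.trans hy'.symm)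

-- ===== VERDICT (by name: the statement is the Claim_ definition above) =====
theorem maxUniqueCandies1_spec : Claim_equal_maxUniqueCandies1 := by
  unfold Claim_equal_maxUniqueCandies1
  intro candies k _ hPre
  unfold Spec_maxUniqueCandies1
  obtain ⟨hk0, hPre2⟩ := hPre
  by_cases hk : k = 0
  · subst hk
    simp only [maxUniqueCandies1, maxUniqueCandies1_alt]
    exact_mod_cast congrArg (Int.ofNat) (counter_size candies)
  · rcases hPre2 with h0 | ⟨x, hx, y, hy, hxy⟩
    · exact absurd h0 hk
    have hk' : k = (k.toNat : Int) := by omega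
    set kn := k.toNat with hkn
    have hk1 : 1 ≤ kn := by omega
    have hn : 2 ≤ (PySem.Set.ofList candies).length := two_le_card candies x y hx hy hxy
    have hlen : 1 ≤ candies.length := List.length_pos_iff.mpr (List.ne_nil_of_mem hx)
    obtain ⟨g, migd, bj, bd, hfold, hrepg, hrepm, htrk⟩ :=
      A_inv candies k kn hk' hk1 hn candies.length hlen le_rfl
    have hA : PySem.List.enumerate candies
        = (idxList candies.length).map (fun i => (i, PySem.List.pyGetD candies i 0)) := by
      rw [PySem.List.enumerate_eq_map_pyRange candies 0]
      rw [show PySem.List.len candies = ((candies.length : Nat) : Int) from rfl]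
      rw [PySem.List.pyRange_zero_natCast, idxList, List.map_map]
    have hB : PySem.List.pyRange 0 (PySem.List.len candies) = idxList candies.length := by
      rw [show PySem.List.len candies = ((candies.length : Nat) : Int) from rfl]
      rw [PySem.List.pyRange_zero_natCast, idxList]
    simp only [maxUniqueCandies1, maxUniqueCandies1_alt, if_neg hk]
    rw [hA, hfold, hB, B_inv candies k kn hk' candies.length, htrk]
    simp only []
    rw [foldl_if_sub]
    rw [slideWin_eq_winN candies k kn hk' bj]
    have hkeys : migd.keys.countP (fun c => migd.getD c 0 == (PySem.Dict.counter candies).getD c 0)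
        = (PySem.Set.ofList (winN candies kn bj)).countP
            (fun c => PySem.List.count (winN candies kn bj) c == PySem.List.count candies c) := by
      rw [CRep_countP migd (winN candies kn bj) hrepm]
      apply List.countP_congr
      intro c _
      rw [hrepm.2.1 c, PySem.Dict.getD_counter]
      simp [PySem.List.count]
    rw [hkeys, counter_size]
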